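-- pv_equiv track=rewrite | github.com/millystuart/tetris | tetrimino.py | coords_with_largest_x
-- ===== SOURCE A (Python) =====
-- def coords_with_largest_x(coords, y_coords):
--       largest_coords = []
--
--       for i in range(0, len(y_coords)):
--             largest_coord = (-1, -1, -1)
--             for j in range(0, len(coords)):
--                   if coords[j][1] == y_coords[i] and coords[j][0] > largest_coord[0]:
--                         largest_coord = coords[j]
--             largest_coords.append(largest_coord)
--
--       return largest_coords
-- ===== SOURCE B (Python) =====
-- def coords_with_largest_x(coords, y_coords):
--     best = {}
--     for c in coords:
--         if c[0] > best.get(c[1], (-1, -1, -1))[0]: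
--             best[c[1]] = c
--     return [best.get(y, (-1, -1, -1)) for y in y_coords]
-- ===== Notes on version B (the rewrite author's own statement) =====
-- stated objective: faster
-- what changed: Replaces the nested scan (one full pass over coords per queried y) with a single pass that builds a dict mapping each y to its max-x coord, then one lookup per queried y.
import Mathlib
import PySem

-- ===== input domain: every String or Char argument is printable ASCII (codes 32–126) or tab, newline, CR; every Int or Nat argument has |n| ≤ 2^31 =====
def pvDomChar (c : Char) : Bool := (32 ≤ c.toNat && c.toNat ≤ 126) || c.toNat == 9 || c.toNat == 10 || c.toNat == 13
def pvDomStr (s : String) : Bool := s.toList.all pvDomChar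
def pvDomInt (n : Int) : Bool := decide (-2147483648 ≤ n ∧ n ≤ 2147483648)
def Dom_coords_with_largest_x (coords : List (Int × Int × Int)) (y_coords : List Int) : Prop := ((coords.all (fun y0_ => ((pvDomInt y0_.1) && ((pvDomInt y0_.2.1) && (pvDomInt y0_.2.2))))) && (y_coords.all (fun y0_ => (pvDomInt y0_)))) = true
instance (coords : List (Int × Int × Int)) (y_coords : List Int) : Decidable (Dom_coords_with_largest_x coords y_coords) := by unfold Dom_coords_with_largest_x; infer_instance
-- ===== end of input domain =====

-- B replaces A's nested scan by one dict-building pass plus a lookup per queried y (asymptotically faster).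

-- ===== PORT A =====
-- Literal port: for each index i into y_coords, scan every index j into coords,
-- keeping the coord with strictly larger x among those whose y matches.
def coords_with_largest_x (coords : List (Int × Int × Int)) (y_coords : List Int) : List (Int × Int × Int) :=
  (PySem.List.pyRange 0 y_coords.length 1).foldl
    (fun largest_coords i =>
      largest_coords ++
        [(PySem.List.pyRange 0 coords.length 1).foldl
          (fun largest_coord j =>
            if (PySem.List.pyGetD coords j (-1, -1, -1)).2.1 = PySem.List.pyGetD y_coords i (-1) ∧
                (PySem.List.pyGetD coords j (-1, -1, -1)).1 > largest_coord.1 then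
              PySem.List.pyGetD coords j (-1, -1, -1)
            else largest_coord)
          (-1, -1, -1)])
    []

-- ===== PORT B =====
-- One pass building a dict y ↦ coord with largest x (first one wins on ties, strict >).
def pvBestByY (coords : List (Int × Int × Int)) : PySem.Dict Int (Int × Int × Int) :=
  coords.foldl
    (fun best c =>
      if c.1 > (best.getD c.2.1 (-1, -1, -1)).1 then best.insert c.2.1 c else best)
    PySem.Dict.empty

def coords_with_largest_x_alt (coords : List (Int × Int × Int)) (y_coords : List Int) : List (Int × Int × Int) :=
  y_coords.map (fun y => (pvBestByY coords).getD y (-1, -1, -1))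

-- ===== PRECONDITION & SPEC =====
def Spec_coords_with_largest_x (coords : List (Int × Int × Int)) (y_coords : List Int) (out : List (Int × Int × Int)) : Prop := out = coords_with_largest_x_alt coords y_coords
instance (coords : List (Int × Int × Int)) (y_coords : List Int) (out : List (Int × Int × Int)) : Decidable (Spec_coords_with_largest_x coords y_coords out) := by unfold Spec_coords_with_largest_x; infer_instance

-- ===== CLAIM (what is proved, stated in full; the proofs are below) =====
def Claim_equal_coords_with_largest_x : Prop := ∀ (coords : List (Int × Int × Int)) (y_coords : List Int), Dom_coords_with_largest_x coords y_coords → Spec_coords_with_largest_x coords y_coords (coords_with_largest_x coords y_coords)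

-- ===== LEMMAS AND PROOFS =====

-- The dict lookup after B's pass equals A's inner accumulator fold, for any starting dict.
theorem pvBestByY_getD (coords : List (Int × Int × Int)) (d : PySem.Dict Int (Int × Int × Int)) (y : Int) :
    ((coords.foldl
        (fun best c =>
          if c.1 > (best.getD c.2.1 (-1, -1, -1)).1 then best.insert c.2.1 c else best)
        d).getD y (-1, -1, -1)) =
      coords.foldl
        (fun largest_coord c =>
          if c.2.1 = y ∧ c.1 > largest_coord.1 then c else largest_coord)
        (d.getD y (-1, -1, -1)) := by
  induction coords generalizing d with
  | nil => rfl
  | cons c cs ih =>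
    simp only [List.foldl_cons]
    by_cases hy : c.2.1 = y
    · subst hy
      by_cases hx : c.1 > (d.getD c.2.1 (-1, -1, -1)).1
      · rw [if_pos hx, ih, PySem.Dict.getD_insert_self, if_pos ⟨rfl, hx⟩]
      · rw [if_neg hx, ih, if_neg (by simp [hx])]
    · by_cases hx : c.1 > (d.getD c.2.1 (-1, -1, -1)).1
      · rw [if_pos hx, ih, PySem.Dict.getD_insert_of_ne _ _ _ (Ne.symm hy), if_neg (by simp [hy])]
      · rw [if_neg hx, ih, if_neg (by simp [hy])]

-- ===== VERDICT (by name: the statement is the Claim_ definition above) =====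
theorem coords_with_largest_x_spec : Claim_equal_coords_with_largest_x := by
  intro coords y_coords _
  unfold Spec_coords_with_largest_x coords_with_largest_x coords_with_largest_x_alt
  rw [PySem.List.foldl_pyRange_zero_pyGetD' y_coords (-1)
    (fun acc y => acc ++
      [(PySem.List.pyRange 0 coords.length 1).foldl
        (fun largest_coord j =>
          if (PySem.List.pyGetD coords j (-1, -1, -1)).2.1 = y ∧
              (PySem.List.pyGetD coords j (-1, -1, -1)).1 > largest_coord.1 then
            PySem.List.pyGetD coords j (-1, -1, -1)
          else largest_coord)
        (-1, -1, -1)]) []]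
  rw [show (List.map (fun y => (pvBestByY coords).getD y (-1, -1, -1)) y_coords : List (Int × Int × Int)) =
        [] ++ List.map (fun y => (pvBestByY coords).getD y (-1, -1, -1)) y_coords from rfl,
    ← PySem.List.foldl_append_singleton_eq_map]
  refine PySem.List.foldl_congr_mem _ _ _ _ (fun acc y _ => ?_)
  rw [PySem.List.foldl_pyRange_zero_pyGetD' coords (-1, -1, -1)
    (fun largest_coord c => if c.2.1 = y ∧ c.1 > largest_coord.1 then c else largest_coord)
    (-1, -1, -1)]
  rw [show pvBestByY coords = List.foldl
      (fun best c => if c.1 > (best.getD c.2.1 (-1, -1, -1)).1 then best.insert c.2.1 c else best)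
      PySem.Dict.empty coords from rfl,
    pvBestByY_getD coords PySem.Dict.empty y]
  simp [PySem.Dict.getD, PySem.Dict.get?, PySem.Dict.empty]
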